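/- GENERATED by farm/worked/mk_tree_copies.py from farm/worked/vorbis_deinit.COMPOSITION/Proof.lean (a worked proof of the farm's unit `vorbis_deinit.COMPOSITION`,
   accepted by the verdict) — do not edit. -/
import Vorbis.Spec.Units.vorbis_deinit_COMPOSITION

/-
  THE COMPOSITION OF vorbis_deinit: the four segment statements give the function's contract. Pure chaining, a straight line
  .1 → .2 → .3 → .4 over the ONE assertion family `vorbis_deinit.At cut …` (Vorbis/Spec/Alloc.lean): segment `k`'s exit assertion
  IS segment `k + 1`'s entry assertion (the same structure at the next cut point), and segment .4 ends in the contract's `Returned`.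
  Every loop of the function (comments, residues, codebooks, mappings, channels) lies inside one segment.
-/
namespace Vorbis.Spec.Worked.vorbis_deinit_COMPOSITION
open Vorbis.Spec.vorbis_deinit_COMPOSITION (Statement)
open X86 X86.User Asan Vorbis Vorbis.Spec

/-- **THE COMPOSITION**: the statement of the unit, by `ReachVia.trans` alone. -/
theorem vorbis_deinit_composes_w : Statement := by
  intro Lay _ μ _ u₀ h1 h2 h3 h4 others frames Blk e ret he hpre
  refine (h1 others frames Blk e ret he hpre).trans ?_
  intro v hv
  refine (h2 others frames Blk e ret v hv).trans ?_
  intro w hw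
  refine (h3 others frames Blk e ret w hw).trans ?_
  intro x hx
  exact h4 others frames Blk e ret x hx

end Vorbis.Spec.Worked.vorbis_deinit_COMPOSITION

theorem Vorbis.Spec.Worked.vorbis_deinit_COMPOSITION_ok : Vorbis.Spec.vorbis_deinit_COMPOSITION.Statement :=
  Vorbis.Spec.Worked.vorbis_deinit_COMPOSITION.vorbis_deinit_composes_w
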